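-- pv_equiv track=rewrite | github.com/DreamingHwz/nanoGPT | data/poems/clean.py | _strip_edge_blank_lines
-- ===== SOURCE A (Python) =====
-- def _strip_edge_blank_lines(lines):
--     """Remove leading and trailing empty strings from a list of lines."""
--
--     start = 0
--     end = len(lines)
--
--     while start < end and lines[start] == "":
--         start += 1
--
--     while end > start and lines[end - 1] == "":
--         end -= 1
--
--     return lines[start:end]
-- ===== SOURCE B (Python) =====
-- def _strip_edge_blank_lines(lines):
--     """Remove leading and trailing empty strings from a list of lines."""
--
--     bounds = None  # (first, last) indices of non-empty lines seen so far
--     for i, line in enumerate(lines):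
--         if line != "":
--             bounds = (i, i) if bounds is None else (bounds[0], i)
--     if bounds is None:
--         return []
--     return lines[bounds[0]:bounds[1] + 1]
-- ===== Notes on version B (the rewrite author's own statement) =====
-- stated objective: alternative
-- what changed: Replaces A's two edge-shrinking while loops (plus a slice) by one forward pass over enumerate(lines) that records the first and last non-empty indices, then slices once.
import Mathlib
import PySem

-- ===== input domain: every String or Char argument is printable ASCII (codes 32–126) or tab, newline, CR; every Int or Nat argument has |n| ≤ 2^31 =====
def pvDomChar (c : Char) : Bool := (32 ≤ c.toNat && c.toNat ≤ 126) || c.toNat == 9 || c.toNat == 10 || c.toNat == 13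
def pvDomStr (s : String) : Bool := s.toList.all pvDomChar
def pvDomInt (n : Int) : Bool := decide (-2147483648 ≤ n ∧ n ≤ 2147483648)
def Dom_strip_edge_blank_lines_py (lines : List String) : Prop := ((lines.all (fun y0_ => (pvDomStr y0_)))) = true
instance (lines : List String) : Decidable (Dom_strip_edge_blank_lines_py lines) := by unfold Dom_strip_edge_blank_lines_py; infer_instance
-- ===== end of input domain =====

-- B replaces A's two edge-shrinking while loops by one forward pass that records the
-- first and last non-empty indices, then a single slice (alternative decomposition, same cost).

-- ===== PORT A =====
-- first while loop: 'while start < end and lines[start] == "": start += 1'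
-- (lines[start] is in range whenever the loop guard holds, so getD is exact there)
def pvAStartLoop (lines : List String) (e : Nat) (s : Nat) : Nat :=
  if s < e ∧ lines.getD s "" = "" then pvAStartLoop lines e (s + 1) else s
termination_by e - s
decreasing_by omega

-- second while loop: 'while end > start and lines[end - 1] == "": end -= 1'
def pvAEndLoop (lines : List String) (s : Nat) (e : Nat) : Nat :=
  if s < e ∧ lines.getD (e - 1) "" = "" then pvAEndLoop lines s (e - 1) else e
termination_by e
decreasing_by omega

def strip_edge_blank_lines_py (lines : List String) : List String :=
  let start := pvAStartLoop lines lines.length 0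
  let stop := pvAEndLoop lines start lines.length
  PySem.List.slice lines (some (start : Int)) (some (stop : Int))

-- ===== PORT B =====
-- loop body: 'if line != "": bounds = (i, i) if bounds is None else (bounds[0], i)'
def pvBStep (st : Option (Int × Int)) (p : Int × String) : Option (Int × Int) :=
  if p.2 ≠ "" then
    match st with
    | none => some (p.1, p.1)
    | some b => some (b.1, p.1)
  else st

def strip_edge_blank_lines_py_alt (lines : List String) : List String :=
  match (PySem.List.enumerate lines).foldl pvBStep none with
  | none => []
  | some b => PySem.List.slice lines (some b.1) (some (b.2 + 1))

-- ===== PRECONDITION & SPEC =====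
def Spec_strip_edge_blank_lines_py (lines : List String) (out : List String) : Prop := out = strip_edge_blank_lines_py_alt lines
instance (lines : List String) (out : List String) : Decidable (Spec_strip_edge_blank_lines_py lines out) := by unfold Spec_strip_edge_blank_lines_py; infer_instance

-- ===== CLAIM (what is proved, stated in full; the proofs are below) =====
def Claim_equal_strip_edge_blank_lines_py : Prop := ∀ (lines : List String), Dom_strip_edge_blank_lines_py lines → Spec_strip_edge_blank_lines_py lines (strip_edge_blank_lines_py lines)

-- ===== LEMMAS AND PROOFS =====

-- A's first loop, started at s, skips exactly the run of empty lines beginning at index s.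
theorem pvAStartLoop_spec (lines : List String) (s : Nat) (hs : s ≤ lines.length) :
    pvAStartLoop lines lines.length s = s + ((lines.drop s).takeWhile (· == "")).length := by
  induction s using pvAStartLoop.induct lines lines.length with
  | case1 s h ih =>
    rw [pvAStartLoop, if_pos h]
    obtain ⟨hlt, hempty⟩ := h
    rw [ih (by omega), List.drop_eq_getElem_cons hlt]
    have hg : lines[s] = "" := by
      rw [← List.getD_eq_getElem lines "" hlt]; exact hempty
    simp [hg]
    omega
  | case2 s h =>
    rw [pvAStartLoop, if_neg h]
    rcases Nat.lt_or_ge s lines.length with hlt | hge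
    · have hne : lines.getD s "" ≠ "" := fun hc => h ⟨hlt, hc⟩
      rw [List.drop_eq_getElem_cons hlt, List.takeWhile_cons]
      rw [List.getD_eq_getElem lines "" hlt] at hne
      have hb : (lines[s] == "") = false := by simpa using hne
      simp [hb]
    · have : s = lines.length := by omega
      simp [this]

-- A's second loop strips the trailing run of empty lines of lines.take e; it never
-- reaches s because lines[s] is non-empty.
theorem pvAEndLoop_spec (lines : List String) (s : Nat) (hs : lines.getD s "" ≠ "") :
    ∀ e, s < e → e ≤ lines.length →
    pvAEndLoop lines s e = e - (((lines.take e).reverse.takeWhile (· == "")).length) := by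
  intro e
  induction e using Nat.strong_induction_on with
  | _ e ih =>
    intro hse he
    have h1 : e - 1 < lines.length := by omega
    have hdecomp : lines.take e = lines.take (e - 1) ++ [lines[e - 1]] := by
      have h2 := List.take_add_one (l := lines) (i := e - 1)
      rw [List.getElem?_eq_getElem h1, show e - 1 + 1 = e from by omega] at h2
      simpa using h2
    rw [pvAEndLoop]
    by_cases hc : s < e ∧ lines.getD (e - 1) "" = ""
    · rw [if_pos hc]
      have hg : lines[e - 1] = "" := by
        rw [← List.getD_eq_getElem lines "" h1]; exact hc.2
      have hne : s ≠ e - 1 := by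
        intro h; apply hs; rw [h]; exact hc.2
      have hlt : s < e - 1 := by omega
      rw [ih (e - 1) (by omega) hlt (by omega)]
      have hb : ((lines.take (e - 1)).reverse.takeWhile (· == "")).length ≤ e - 1 := by
        calc ((lines.take (e - 1)).reverse.takeWhile (· == "")).length
            ≤ (lines.take (e - 1)).reverse.length := (List.takeWhile_sublist _).length_le
          _ ≤ e - 1 := by simp [List.length_take]
      rw [hdecomp]
      simp [hg]
      omega
    · rw [if_neg hc]
      have hgne : lines.getD (e - 1) "" ≠ "" := fun h => hc ⟨hse, h⟩
      rw [List.getD_eq_getElem lines "" h1] at hgne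
      have hb : (lines[e - 1] == "") = false := by simpa using hgne
      rw [hdecomp]
      rw [List.reverse_append]
      simp only [List.reverse_cons, List.reverse_nil, List.nil_append, List.singleton_append,
        List.takeWhile_cons, hb]
      simp

-- 'every line is empty' is the same as the leading empty run covering the whole list.
theorem pvTwLenIff (xs : List String) :
    ((xs.takeWhile (· == "")).length = xs.length) ↔ xs.all (· == "") = true := by
  constructor
  · intro h
    have h2 := (List.takeWhile_sublist (p := (· == "")) (l := xs)).eq_of_length h
    rw [List.takeWhile_eq_self_iff] at h2
    simpa [List.all_eq_true] using h2
  · intro h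
    rw [List.takeWhile_eq_self_iff.mpr (by simpa [List.all_eq_true] using h)]

-- the line just after the leading empty run is non-empty
theorem pvTwGetD (lines : List String) (h : (lines.takeWhile (· == "")).length < lines.length) :
    lines.getD ((lines.takeWhile (· == "")).length) "" ≠ "" := by
  induction lines with
  | nil => simp at h
  | cons a l ih =>
    by_cases ha : (a == "") = true
    · rw [List.takeWhile_cons, if_pos ha] at h ⊢
      simpa using ih (by simpa using h)
    · rw [List.takeWhile_cons, if_neg (by simpa using ha)]
      simpa using ha

-- B's fold computes (first non-empty index, last non-empty index), none if all lines are empty.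
theorem pvBFold_spec (lines : List String) :
    (PySem.List.enumerate lines).foldl pvBStep none =
      if lines.all (· == "") then none
      else some (((lines.takeWhile (· == "")).length : Int),
                 (lines.length : Int) - 1 - ((lines.reverse.takeWhile (· == "")).length : Int)) := by
  induction lines using List.reverseRecOn with
  | nil => simp [PySem.List.enumerate]
  | append_singleton xs x ih =>
    rw [PySem.List.enumerate_append, List.foldl_append, ih,
      PySem.List.enumerate_cons, PySem.List.enumerate_nil]
    simp only [List.foldl_cons, List.foldl_nil]
    by_cases hx : x = ""
    · subst hx
      by_cases hall : xs.all (· == "") = true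
      · rw [if_pos hall, if_pos (by simp [List.all_append, hall])]
        simp [pvBStep]
      · rw [if_neg hall, if_neg (by simp [List.all_append, hall])]
        simp only [pvBStep, if_neg (by simp : ¬(("" : String) ≠ ""))]
        congr 1
        rw [Prod.mk.injEq]
        constructor
        · rw [List.takeWhile_append,
            if_neg (fun h => hall ((pvTwLenIff xs).mp h))]
        · rw [List.reverse_append]
          simp
          omega
    · by_cases hall : xs.all (· == "") = true
      · rw [if_pos hall, if_neg (by simp [List.all_append, hx])]
        simp only [pvBStep, if_pos (by simpa using hx : (x ≠ ""))]
        congr 1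
        rw [Prod.mk.injEq]
        constructor
        · have hxf : (x == "") = false := by simpa using hx
          rw [List.takeWhile_append, if_pos ((pvTwLenIff xs).mpr hall)]
          simp [hxf]
        · rw [List.reverse_append]
          have hxf : (x == "") = false := by simpa using hx
          simp [hxf]
      · rw [if_neg hall, if_neg (by simp [List.all_append, hall])]
        simp only [pvBStep, if_pos (by simpa using hx : (x ≠ ""))]
        congr 1
        rw [Prod.mk.injEq]
        constructor
        · rw [List.takeWhile_append,
            if_neg (fun h => hall ((pvTwLenIff xs).mp h))]
        · rw [List.reverse_append]
          have hxf : (x == "") = false := by simpa using hx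
          simp [hxf]

-- ===== VERDICT (by name: the statement is the Claim_ definition above) =====
theorem strip_edge_blank_lines_py_spec : Claim_equal_strip_edge_blank_lines_py := by
  intro lines _dom
  show strip_edge_blank_lines_py lines = strip_edge_blank_lines_py_alt lines
  have hs0 : pvAStartLoop lines lines.length 0 = (lines.takeWhile (· == "")).length := by
    simpa using pvAStartLoop_spec lines 0 (by omega)
  have hBB := pvBFold_spec lines
  unfold strip_edge_blank_lines_py strip_edge_blank_lines_py_alt
  rw [hBB]
  by_cases hall : lines.all (· == "") = true
  · rw [if_pos hall]
    have hk : (lines.takeWhile (· == "")).length = lines.length := (pvTwLenIff _).mpr hall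
    show PySem.List.slice lines (some ((pvAStartLoop lines lines.length 0 : Nat) : Int))
        (some ((pvAEndLoop lines (pvAStartLoop lines lines.length 0) lines.length : Nat) : Int))
      = ([] : List String)
    rw [hs0, hk, pvAEndLoop, if_neg (by omega), PySem.List.slice_natCast]
    simp
  · rw [if_neg hall]
    have hk : (lines.takeWhile (· == "")).length < lines.length :=
      lt_of_le_of_ne (List.takeWhile_sublist _).length_le
        (fun h => hall ((pvTwLenIff _).mp h))
    have hend := pvAEndLoop_spec lines _ (pvTwGetD lines hk) lines.length hk (le_refl _)
    rw [List.take_length] at hend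
    have ht : (lines.reverse.takeWhile (· == "")).length < lines.length := by
      rcases Nat.lt_or_ge (lines.reverse.takeWhile (· == "")).length lines.length with h | h
      · exact h
      · exfalso
        have hle : (lines.reverse.takeWhile (· == "")).length ≤ lines.reverse.length :=
          (List.takeWhile_sublist _).length_le
        rw [List.length_reverse] at hle
        have heq : (lines.reverse.takeWhile (· == "")).length = lines.reverse.length := by
          rw [List.length_reverse]; omega
        have hrev := (pvTwLenIff lines.reverse).mp heq
        apply hall
        simpa [List.all_eq_true, List.mem_reverse] using
          (by simpa [List.all_eq_true] using hrev : ∀ x ∈ lines.reverse, (x == "") = true)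
    show PySem.List.slice lines (some ((pvAStartLoop lines lines.length 0 : Nat) : Int))
        (some ((pvAEndLoop lines (pvAStartLoop lines lines.length 0) lines.length : Nat) : Int))
      = PySem.List.slice lines (some ((lines.takeWhile (· == "")).length : Int))
        (some (((lines.length : Int) - 1 - ((lines.reverse.takeWhile (· == "")).length : Int)) + 1))
    have hcast : ((lines.length : Int) - 1 - ((lines.reverse.takeWhile (· == "")).length : Int)) + 1
        = ((lines.length - (lines.reverse.takeWhile (· == "")).length : Nat) : Int) := by
      omega
    rw [hs0, hend, hcast]
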